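-- pv_equiv track=rewrite | github.com/stereoabuse/codewars | problems/row_of_the_odd_triangle.py | odd_row
-- ===== SOURCE A (Python) =====
-- def odd_row(n):
--     total = 0
--     returnlist = []
--     for i in range(n-1,0, -1):
--         total += i
--     starting_odd = total * 2 + 1
--     for i in range(1,n+1):
--         returnlist.append(starting_odd)
--         starting_odd += 2
--     return returnlist
-- ===== SOURCE B (Python) =====
-- def odd_row(n):
--     start = n * n - n + 1
--     return list(range(start, start + 2 * n, 2))
-- ===== Notes on version B (the rewrite author's own statement) =====
-- stated objective: simpler
-- what changed: Replaces A's two loops (a countdown summation to find the first odd number, then an append loop) with a closed-form first element n*n-n+1 and a single loopless range(start, start+2n, 2).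
import Mathlib
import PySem

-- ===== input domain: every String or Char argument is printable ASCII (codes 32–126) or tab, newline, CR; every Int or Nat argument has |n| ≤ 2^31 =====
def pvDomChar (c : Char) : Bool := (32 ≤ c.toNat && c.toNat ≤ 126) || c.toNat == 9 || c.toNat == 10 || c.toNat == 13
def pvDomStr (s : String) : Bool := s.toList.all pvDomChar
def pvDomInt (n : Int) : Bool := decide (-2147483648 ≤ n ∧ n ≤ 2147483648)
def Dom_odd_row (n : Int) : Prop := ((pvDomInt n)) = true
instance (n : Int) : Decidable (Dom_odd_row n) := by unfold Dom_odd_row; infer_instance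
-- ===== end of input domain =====

-- B replaces A's two loops with a closed-form first element (n*n - n + 1) and a single range; objective: simpler.


-- ===== PORT A =====
def odd_row (n : Int) : List Int :=
  let total : Int := (PySem.List.pyRange (n-1) 0 (-1)).foldl (fun t i => t + i) 0
  let starting_odd : Int := total * 2 + 1
  let st := (PySem.List.pyRange 1 (n+1) 1).foldl
      (fun (st : List Int × Int) (_ : Int) => (st.1 ++ [st.2], st.2 + 2)) ([], starting_odd)
  st.1

-- ===== PORT B =====
def odd_row_alt (n : Int) : List Int :=
  let start : Int := n * n - n + 1
  PySem.List.pyRange start (start + 2 * n) 2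

-- ===== PRECONDITION & SPEC =====
def Spec_odd_row (n : Int) (out : List Int) : Prop := out = odd_row_alt n
instance (n : Int) (out : List Int) : Decidable (Spec_odd_row n out) := by unfold Spec_odd_row; infer_instance

-- ===== CLAIM (what is proved, stated in full; the proofs are below) =====
def Claim_equal_odd_row : Prop := ∀ (n : Int), Dom_odd_row n → Spec_odd_row n (odd_row n)

-- ===== LEMMAS AND PROOFS =====

-- the summation loop of A (total twice, to avoid division)
lemma pv_sum_countdown (m : Nat) (c t : Int) :
    ((List.range m).map (fun k : Nat => c - (k : Int))).foldl (fun a b => a + b) t * 2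
      = t * 2 + (m : Int) * (2 * c - (m : Int) + 1) := by
  induction m generalizing t with
  | zero => simp
  | succ m ih =>
      rw [List.range_succ, List.map_append, List.foldl_append]
      simp only [List.map_cons, List.map_nil, List.foldl_cons, List.foldl_nil]
      push_cast
      linear_combination ih t

-- the build loop of A
lemma pv_build_loop (m : Nat) (acc : List Int) (s : Int) :
    (List.range m).foldl (fun (st : List Int × Int) (_ : Nat) => (st.1 ++ [st.2], st.2 + 2)) (acc, s)
      = (acc ++ (List.range m).map (fun k : Nat => s + 2 * (k : Int)), s + 2 * (m : Int)) := by
  induction m generalizing acc s with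
  | zero => simp
  | succ m ih =>
      rw [List.range_succ, List.foldl_append]
      simp only [List.foldl_cons, List.foldl_nil, ih]
      refine Prod.ext ?_ ?_
      · simp [List.range_succ, List.append_assoc]
      · push_cast; ring

-- B's range in map form, for positive n
lemma pv_alt_pos (n : Int) (hn : 0 < n) :
    odd_row_alt n = (List.range n.toNat).map (fun k : Nat => (n * n - n + 1) + 2 * (k : Int)) := by
  unfold odd_row_alt
  rw [PySem.List.pyRange_of_pos _ _ (by norm_num : (0 : Int) < 2)]
  have hlt : n * n - n + 1 < n * n - n + 1 + 2 * n := by linarith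
  rw [if_pos hlt]
  have hc : (n * n - n + 1 + 2 * n - (n * n - n + 1) + 2 - 1) / 2 = n := by
    have h1 : n * n - n + 1 + 2 * n - (n * n - n + 1) + 2 - 1 = 1 + n * 2 := by ring
    rw [h1, Int.add_mul_ediv_right 1 n (by norm_num)]
    norm_num
  rw [hc]

theorem pv_main (n : Int) : odd_row n = odd_row_alt n := by
  by_cases hn : n ≤ 0
  · -- both empty
    simp only [odd_row]
    rw [PySem.List.pyRange_one_eq_nil (by linarith : n + 1 ≤ 1)]
    unfold odd_row_alt
    rw [PySem.List.pyRange_of_pos _ _ (by norm_num : (0 : Int) < 2)]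
    rw [if_neg (by nlinarith : ¬ (n * n - n + 1 < n * n - n + 1 + 2 * n))]
    simp
  · push_neg at hn
    simp only [odd_row]
    set t : Int := (PySem.List.pyRange (n-1) 0 (-1)).foldl (fun t i => t + i) 0 with ht
    have hm : ((n - 1).toNat : Int) = n - 1 := Int.toNat_of_nonneg (by linarith)
    have htot : t * 2 + 1 = n * n - n + 1 := by
      rw [ht, PySem.List.pyRange_neg_one]
      have h := pv_sum_countdown (n - 1 - 0).toNat (n - 1) 0
      simp only [sub_zero] at h ⊢
      rw [h, hm]; ring
    rw [PySem.List.pyRange_one]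
    have hcnt : (n + 1 - 1) = n := by ring
    rw [hcnt, List.foldl_map, pv_build_loop, pv_alt_pos n hn]
    simp only [List.nil_append]
    rw [htot]

-- ===== VERDICT (by name: the statement is the Claim_ definition above) =====
theorem odd_row_spec : Claim_equal_odd_row := by
  intro n _
  exact pv_main n
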